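-- pv_equiv track=rewrite | github.com/SherMM/rosalind-python | entropy.py | Count
-- ===== SOURCE A (Python) =====
-- def Count(matrix):
-- 	columns = zip(*matrix)
-- 	counts = {'A':[], 'C':[], 'G':[], 'T':[]}
-- 	for col in columns:
-- 		for letter in counts.keys():
-- 			col_count = sum([col.count(letter), col.count(letter.lower())])
-- 			counts[letter] = counts.get(letter, []) + [col_count]
-- 	return counts
-- ===== SOURCE B (Python) =====
-- def Count(matrix):
--     ncols = min((len(row) for row in matrix), default=0)
--     a = [0] * ncols
--     c = [0] * ncols
--     g = [0] * ncols
--     t = [0] * ncols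
--     for row in matrix:
--         for i in range(ncols):
--             ch = row[i]
--             if ch in 'Aa':
--                 a[i] += 1
--             elif ch in 'Cc':
--                 c[i] += 1
--             elif ch in 'Gg':
--                 g[i] += 1
--             elif ch in 'Tt':
--                 t[i] += 1
--     return {'A': a, 'C': c, 'G': g, 'T': t}
-- ===== Notes on version B (the rewrite author's own statement) =====
-- stated objective: alternative
-- what changed: A transposes the matrix (zip(*matrix)) and calls tuple.count twice per letter per column; B makes a single row-major pass that bumps a position-indexed tally list per base, with the column width capped at the shortest row to mirror zip's truncation.
import Mathlib
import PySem

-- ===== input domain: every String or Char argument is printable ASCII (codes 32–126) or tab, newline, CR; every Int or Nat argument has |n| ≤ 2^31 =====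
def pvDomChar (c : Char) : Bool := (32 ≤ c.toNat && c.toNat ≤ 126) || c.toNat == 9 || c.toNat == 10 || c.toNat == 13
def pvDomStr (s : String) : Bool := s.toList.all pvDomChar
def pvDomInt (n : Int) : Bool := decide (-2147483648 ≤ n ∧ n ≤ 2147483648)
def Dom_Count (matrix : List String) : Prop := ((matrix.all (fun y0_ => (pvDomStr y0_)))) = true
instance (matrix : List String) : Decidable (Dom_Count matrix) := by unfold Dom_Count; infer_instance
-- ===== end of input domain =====

-- B replaces A's transpose-then-count-per-letter scan by a single row-major pass over a
-- position-indexed tally table (objective: alternative decomposition, same asymptotic cost).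

-- ===== PORT A =====
-- zip(*matrix): columns i = (row[i] for row in matrix), for i below the shortest row length
def Count (matrix : List String) : List (String × List Int) :=
  let rows := matrix.map String.toList
  let n := ((rows.map List.length).min?).getD 0
  let cols := (List.range n).map (fun i => rows.map (fun r => r.getD i ' '))
  -- sum([col.count(letter), col.count(letter.lower())])
  let cnt : List Char → Char → Char → Int := fun col u lo =>
    ((col.count u : Int) + (col.count lo : Int))
  let st := cols.foldl
    (fun (s : List Int × List Int × List Int × List Int) col =>
      (s.1 ++ [cnt col 'A' 'a'], s.2.1 ++ [cnt col 'C' 'c'],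
       s.2.2.1 ++ [cnt col 'G' 'g'], s.2.2.2 ++ [cnt col 'T' 't']))
    ([], [], [], [])
  [("A", st.1), ("C", st.2.1), ("G", st.2.2.1), ("T", st.2.2.2)]

-- ===== PORT B =====
def selA (ch : Char) : Bool := ch == 'A' || ch == 'a'
def selC (ch : Char) : Bool := ch == 'C' || ch == 'c'
def selG (ch : Char) : Bool := ch == 'G' || ch == 'g'
def selT (ch : Char) : Bool := ch == 'T' || ch == 't'

-- body of B's inner loop: look at row[i] and bump the matching tally at position i
def bStep (r : List Char) (s : List Int × List Int × List Int × List Int) (i : Nat) :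
    List Int × List Int × List Int × List Int :=
  let ch := r.getD i ' '
  if selA ch then (s.1.modify i (· + 1), s.2.1, s.2.2.1, s.2.2.2)
  else if selC ch then (s.1, s.2.1.modify i (· + 1), s.2.2.1, s.2.2.2)
  else if selG ch then (s.1, s.2.1, s.2.2.1.modify i (· + 1), s.2.2.2)
  else if selT ch then (s.1, s.2.1, s.2.2.1, s.2.2.2.modify i (· + 1))
  else s

def Count_alt (matrix : List String) : List (String × List Int) :=
  let rows := matrix.map String.toList
  let n := ((rows.map List.length).min?).getD 0
  let z : List Int := List.replicate n 0
  let st := rows.foldl (fun s r => (List.range n).foldl (bStep r) s) (z, z, z, z)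
  [("A", st.1), ("C", st.2.1), ("G", st.2.2.1), ("T", st.2.2.2)]

-- ===== PRECONDITION & SPEC =====
def Spec_Count (matrix : List String) (out : List (String × List Int)) : Prop := out = Count_alt matrix
instance (matrix : List String) (out : List (String × List Int)) : Decidable (Spec_Count matrix out) := by unfold Spec_Count; infer_instance

-- ===== CLAIM (what is proved, stated in full; the proofs are below) =====
def Claim_equal_Count : Prop := ∀ (matrix : List String), Dom_Count matrix → Spec_Count matrix (Count matrix)

-- ===== LEMMAS AND PROOFS =====

-- B's inner loop for a single tally list
def inner1 (sel : Char → Bool) (r : List Char) (n : Nat) (l : List Int) : List Int :=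
  (List.range n).foldl (fun l i => if sel (r.getD i ' ') then l.modify i (· + 1) else l) l

-- B's outer loop for a single tally list
def outer1 (sel : Char → Bool) (rows : List (List Char)) (n : Nat) (l : List Int) : List Int :=
  rows.foldl (fun l r => inner1 sel r n l) l

theorem foldl_prod4 {α : Type} (F : List Int × List Int × List Int × List Int → α → List Int × List Int × List Int × List Int)
    (g1 g2 g3 g4 : List Int → α → List Int)
    (h1 : ∀ s x, (F s x).1 = g1 s.1 x) (h2 : ∀ s x, (F s x).2.1 = g2 s.2.1 x)
    (h3 : ∀ s x, (F s x).2.2.1 = g3 s.2.2.1 x) (h4 : ∀ s x, (F s x).2.2.2 = g4 s.2.2.2 x)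
    (xs : List α) : ∀ (s : List Int × List Int × List Int × List Int),
    xs.foldl F s = (xs.foldl g1 s.1, xs.foldl g2 s.2.1, xs.foldl g3 s.2.2.1, xs.foldl g4 s.2.2.2) := by
  induction xs with
  | nil => intro s; rfl
  | cons x xs ih =>
    intro s
    simp only [List.foldl_cons, ih (F s x), h1, h2, h3, h4]

theorem selA_selC (ch : Char) (h : selA ch = true) : selC ch = false := by
  rcases (by simpa [selA] using h : ch = 'A' ∨ ch = 'a') with rfl | rfl <;> decide
theorem selA_selG (ch : Char) (h : selA ch = true) : selG ch = false := by
  rcases (by simpa [selA] using h : ch = 'A' ∨ ch = 'a') with rfl | rfl <;> decide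
theorem selA_selT (ch : Char) (h : selA ch = true) : selT ch = false := by
  rcases (by simpa [selA] using h : ch = 'A' ∨ ch = 'a') with rfl | rfl <;> decide
theorem selC_selG (ch : Char) (h : selC ch = true) : selG ch = false := by
  rcases (by simpa [selC] using h : ch = 'C' ∨ ch = 'c') with rfl | rfl <;> decide
theorem selC_selT (ch : Char) (h : selC ch = true) : selT ch = false := by
  rcases (by simpa [selC] using h : ch = 'C' ∨ ch = 'c') with rfl | rfl <;> decide
theorem selG_selT (ch : Char) (h : selG ch = true) : selT ch = false := by
  rcases (by simpa [selG] using h : ch = 'G' ∨ ch = 'g') with rfl | rfl <;> decide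

theorem bStep_fst (r : List Char) (s : List Int × List Int × List Int × List Int) (i : Nat) :
    (bStep r s i).1 = if selA (r.getD i ' ') then s.1.modify i (· + 1) else s.1 := by
  unfold bStep
  cases hA : selA (r.getD i ' ') <;> cases hC : selC (r.getD i ' ') <;>
    cases hG : selG (r.getD i ' ') <;> cases hT : selT (r.getD i ' ') <;>
    simp_all [selA_selC _, selA_selG _, selA_selT _, selC_selG _, selC_selT _, selG_selT _]

theorem bStep_snd (r : List Char) (s : List Int × List Int × List Int × List Int) (i : Nat) :
    (bStep r s i).2.1 = if selC (r.getD i ' ') then s.2.1.modify i (· + 1) else s.2.1 := by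
  unfold bStep
  cases hA : selA (r.getD i ' ') <;> cases hC : selC (r.getD i ' ') <;>
    cases hG : selG (r.getD i ' ') <;> cases hT : selT (r.getD i ' ') <;>
    simp_all [selA_selC _, selA_selG _, selA_selT _, selC_selG _, selC_selT _, selG_selT _]

theorem bStep_thd (r : List Char) (s : List Int × List Int × List Int × List Int) (i : Nat) :
    (bStep r s i).2.2.1 = if selG (r.getD i ' ') then s.2.2.1.modify i (· + 1) else s.2.2.1 := by
  unfold bStep
  cases hA : selA (r.getD i ' ') <;> cases hC : selC (r.getD i ' ') <;>
    cases hG : selG (r.getD i ' ') <;> cases hT : selT (r.getD i ' ') <;>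
    simp_all [selA_selC _, selA_selG _, selA_selT _, selC_selG _, selC_selT _, selG_selT _]

theorem bStep_fth (r : List Char) (s : List Int × List Int × List Int × List Int) (i : Nat) :
    (bStep r s i).2.2.2 = if selT (r.getD i ' ') then s.2.2.2.modify i (· + 1) else s.2.2.2 := by
  unfold bStep
  cases hA : selA (r.getD i ' ') <;> cases hC : selC (r.getD i ' ') <;>
    cases hG : selG (r.getD i ' ') <;> cases hT : selT (r.getD i ' ') <;>
    simp_all [selA_selC _, selA_selG _, selA_selT _, selC_selG _, selC_selT _, selG_selT _]

theorem inner_decomp (r : List Char) (n : Nat) (s : List Int × List Int × List Int × List Int) :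
    (List.range n).foldl (bStep r) s =
      (inner1 selA r n s.1, inner1 selC r n s.2.1, inner1 selG r n s.2.2.1, inner1 selT r n s.2.2.2) := by
  exact foldl_prod4 _ _ _ _ _ (bStep_fst r) (bStep_snd r) (bStep_thd r) (bStep_fth r) _ s

theorem length_foldl_bump (sel : Char → Bool) (r : List Char) (is : List Nat) :
    ∀ (l : List Int),
    (is.foldl (fun l i => if sel (r.getD i ' ') then l.modify i (· + 1) else l) l).length = l.length := by
  induction is with
  | nil => intro l; rfl
  | cons i is ih =>
    intro l
    rw [List.foldl_cons, ih]
    split_ifs <;> simp [List.length_modify]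

theorem length_inner1 (sel : Char → Bool) (r : List Char) (n : Nat) (l : List Int) :
    (inner1 sel r n l).length = l.length :=
  length_foldl_bump sel r (List.range n) l

theorem inner1_succ (sel : Char → Bool) (r : List Char) (n : Nat) (l : List Int) :
    inner1 sel r (n + 1) l =
      (if sel (r.getD n ' ') then (inner1 sel r n l).modify n (· + 1) else inner1 sel r n l) := by
  simp [inner1, List.range_succ]

theorem getD_modify_ne (l : List Int) (n j : Nat) (f : Int → Int) (hne : n ≠ j) :
    (l.modify n f).getD j 0 = l.getD j 0 := by
  rw [List.getD_eq_getElem?_getD, List.getElem?_modify]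
  simp [hne, List.getD_eq_getElem?_getD]

theorem getD_inner1_ge (sel : Char → Bool) (r : List Char) (n : Nat) (l : List Int) (j : Nat)
    (hj : n ≤ j) : (inner1 sel r n l).getD j 0 = l.getD j 0 := by
  induction n with
  | zero => rfl
  | succ n ih =>
    rw [inner1_succ]
    have hne : n ≠ j := by omega
    split_ifs with hs
    · rw [getD_modify_ne _ _ _ _ hne]; exact ih (by omega)
    · exact ih (by omega)

theorem getD_inner1 (sel : Char → Bool) (r : List Char) (n : Nat) (l : List Int)
    (h : n ≤ l.length) (j : Nat) (hj : j < n) :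
    (inner1 sel r n l).getD j 0 = l.getD j 0 + (if sel (r.getD j ' ') then 1 else 0) := by
  induction n with
  | zero => omega
  | succ n ih =>
    rw [inner1_succ]
    by_cases hjn : j < n
    · have hne : n ≠ j := by omega
      have key : (if sel (r.getD n ' ') then (inner1 sel r n l).modify n (· + 1)
          else inner1 sel r n l).getD j 0 = (inner1 sel r n l).getD j 0 := by
        split_ifs with hs
        · exact getD_modify_ne _ _ _ _ hne
        · rfl
      rw [key]; exact ih (by omega) hjn
    · have hj' : j = n := by omega
      subst hj'
      have hbase : (inner1 sel r j l).getD j 0 = l.getD j 0 := getD_inner1_ge sel r j l j le_rfl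
      have hlt : j < (inner1 sel r j l).length := by rw [length_inner1]; omega
      split_ifs with hs
      · rw [List.getD_eq_getElem?_getD, List.getElem?_modify,
          List.getElem?_eq_getElem hlt]
        simp only [Option.map_some, Option.getD_some, if_true]
        rw [← List.getD_eq_getElem _ _ hlt, hbase]
        rfl
      · rw [hbase]; ring

theorem length_outer1 (sel : Char → Bool) (rows : List (List Char)) (n : Nat) :
    ∀ (l : List Int), (outer1 sel rows n l).length = l.length := by
  induction rows with
  | nil => intro l; rfl
  | cons r rs ih =>
    intro l
    show (outer1 sel rs n (inner1 sel r n l)).length = l.length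
    rw [ih, length_inner1]

theorem getD_outer1 (sel : Char → Bool) (rows : List (List Char)) (n : Nat) (j : Nat)
    (hj : j < n) : ∀ (l : List Int), n ≤ l.length →
    (outer1 sel rows n l).getD j 0 =
      l.getD j 0 + ((rows.countP (fun r => sel (r.getD j ' ')) : Int)) := by
  induction rows with
  | nil => intro l _; simp [outer1]
  | cons r rs ih =>
    intro l h
    show (outer1 sel rs n (inner1 sel r n l)).getD j 0 = _
    rw [ih (inner1 sel r n l) (by rw [length_inner1]; exact h),
      getD_inner1 sel r n l h j hj, List.countP_cons]
    push_cast
    split_ifs <;> ring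

theorem foldA (f1 f2 f3 f4 : List Char → Int) (cols : List (List Char)) :
    ∀ (a b c d : List Int),
    cols.foldl (fun s col => (s.1 ++ [f1 col], s.2.1 ++ [f2 col], s.2.2.1 ++ [f3 col], s.2.2.2 ++ [f4 col]))
      (a, b, c, d) =
    (a ++ cols.map f1, b ++ cols.map f2, c ++ cols.map f3, d ++ cols.map f4) := by
  induction cols with
  | nil => intro a b c d; simp
  | cons col cols ih => intro a b c d; simp [ih]

theorem countP_orr {α : Type} (p q : α → Bool) (h : ∀ x, p x = true → q x = false) (l : List α) :
    l.countP (fun x => p x || q x) = l.countP p + l.countP q := by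
  induction l with
  | nil => rfl
  | cons x xs ih =>
    by_cases hp : p x = true
    · simp [List.countP_cons, hp, h x hp, ih]; omega
    · simp at hp
      by_cases hq : q x = true <;> simp [List.countP_cons, hp, hq, ih] <;> omega

theorem eq_map_range {L : List Int} {n : Nat} {f : Nat → Int}
    (hlen : L.length = n) (h : ∀ i < n, L.getD i 0 = f i) : L = (List.range n).map f := by
  apply List.ext_getElem (by simp [hlen])
  intro i h1 h2
  have hi : i < n := by simpa [hlen] using h1
  have := h i hi
  rw [List.getD_eq_getElem _ _ h1] at this
  simpa using this

-- one letter: B's tally list equals A's per-column count list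
theorem letter_eq (rows : List (List Char)) (n : Nat) (u lo : Char) (sel : Char → Bool)
    (hsel : ∀ ch, sel ch = (ch == u || ch == lo)) (hne : u ≠ lo) :
    outer1 sel rows n (List.replicate n 0) =
      (List.range n).map (fun i =>
        (((rows.map (fun r => r.getD i ' ')).count u : Int) +
         ((rows.map (fun r => r.getD i ' ')).count lo : Int))) := by
  apply eq_map_range (by rw [length_outer1, List.length_replicate])
  intro i hi
  rw [getD_outer1 sel rows n i hi (List.replicate n 0) (by simp),
    List.getD_replicate _ hi]
  have hcnt : rows.countP (fun r => sel (r.getD i ' ')) =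
      (rows.map (fun r => r.getD i ' ')).count u +
      (rows.map (fun r => r.getD i ' ')).count lo := by
    rw [List.count_eq_countP, List.count_eq_countP, List.countP_map, List.countP_map]
    rw [show (fun r => sel (r.getD i ' ')) =
        (fun r : List Char => (r.getD i ' ' == u) || (r.getD i ' ' == lo)) by
      funext r; rw [hsel]]
    exact countP_orr _ _ (fun r hp => by
      simp only [beq_iff_eq] at hp
      rw [hp, beq_eq_false_iff_ne]
      exact hne) rows
  rw [hcnt]
  push_cast
  ring

theorem outer_decomp (rows : List (List Char)) (n : Nat)
    (s : List Int × List Int × List Int × List Int) :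
    rows.foldl (fun s r => (List.range n).foldl (bStep r) s) s =
      (outer1 selA rows n s.1, outer1 selC rows n s.2.1,
       outer1 selG rows n s.2.2.1, outer1 selT rows n s.2.2.2) :=
  foldl_prod4 _ _ _ _ _
    (fun s r => by rw [inner_decomp]) (fun s r => by rw [inner_decomp])
    (fun s r => by rw [inner_decomp]) (fun s r => by rw [inner_decomp]) rows s

-- ===== VERDICT (by name: the statement is the Claim_ definition above) =====
theorem Count_spec : Claim_equal_Count := by
  intro matrix _
  unfold Spec_Count Count Count_alt
  simp only [outer_decomp, foldA, List.nil_append, List.map_map]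
  rw [letter_eq _ _ 'A' 'a' selA (fun _ => rfl) (by decide),
      letter_eq _ _ 'C' 'c' selC (fun _ => rfl) (by decide),
      letter_eq _ _ 'G' 'g' selG (fun _ => rfl) (by decide),
      letter_eq _ _ 'T' 't' selT (fun _ => rfl) (by decide)]
  simp only [List.map_map, Function.comp_def]
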